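-- pv_equiv track=rewrite | github.com/vjeranc/expr-trees | expr_trees.py | expr_trees
-- ===== SOURCE A (Python) =====
-- def expr_trees(n, u, i):
--     if i == n:
--         return [[]]
--     cnt = max(0, i + 1 - u)
--     s = []
--     for x in range(cnt if (i+1 == n) else 0, cnt + 1):
--         s.extend([[x] + y for y in expr_trees(n, u+x, i+1)])
--     return s
-- ===== SOURCE B (Python) =====
-- def expr_trees(n, u, i):
--     frontier = [([], u)]
--     for pos in range(i, n):
--         frontier = [
--             (prefix + [x], s0 + x)
--             for prefix, s0 in frontier
--             for x in range(
--                 max(0, pos + 1 - s0) if pos + 1 == n else 0,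
--                 max(0, pos + 1 - s0) + 1,
--             )
--         ]
--     return [p for p, _ in frontier]
-- ===== Notes on version B (the rewrite author's own statement) =====
-- stated objective: alternative
-- what changed: Replaces A's top-down recursion over positions with an iterative breadth-first frontier builder that keeps (prefix, running-sum) states and rebuilds the frontier once per position with a flat comprehension, emitting prefixes in the same lexicographic order.
import Mathlib
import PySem

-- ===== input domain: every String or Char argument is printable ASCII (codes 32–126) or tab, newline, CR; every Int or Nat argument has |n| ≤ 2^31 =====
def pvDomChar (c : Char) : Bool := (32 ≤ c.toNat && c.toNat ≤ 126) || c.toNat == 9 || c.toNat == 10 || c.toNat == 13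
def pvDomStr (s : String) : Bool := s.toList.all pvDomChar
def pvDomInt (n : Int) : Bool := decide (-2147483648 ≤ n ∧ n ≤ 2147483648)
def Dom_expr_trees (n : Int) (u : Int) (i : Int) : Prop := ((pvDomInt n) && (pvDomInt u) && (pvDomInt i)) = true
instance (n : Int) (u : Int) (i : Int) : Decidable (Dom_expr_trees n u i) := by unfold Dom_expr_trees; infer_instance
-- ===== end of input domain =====

-- B replaces A's recursion by an iterative frontier builder over positions (alternative decomposition, same cost).

-- ===== PORT A =====
-- A's recursion terminates only for i ≤ n (Pre_); fuel (n-i).toNat merely makes the same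
-- computation total — on Pre_ it is never exhausted.
def exprTreesFuel (fuel : Nat) (n : Int) (u : Int) (i : Int) : List (List Int) :=
  if i = n then [[]]
  else
    match fuel with
    | 0 => []
    | f + 1 =>
      let cnt := max 0 (i + 1 - u)
      (PySem.List.pyRange (if i + 1 = n then cnt else 0) (cnt + 1) 1).foldl
        (fun s x => s ++ (exprTreesFuel f n (u + x) (i + 1)).map (fun y => x :: y)) []

def expr_trees (n : Int) (u : Int) (i : Int) : List (List Int) :=
  exprTreesFuel (n - i).toNat n u i

-- ===== PORT B =====
-- one step of the frontier rebuild at position pos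
def exprStep (n : Int) (pos : Int) (frontier : List (List Int × Int)) : List (List Int × Int) :=
  frontier.flatMap (fun ps =>
    (PySem.List.pyRange (if pos + 1 = n then max 0 (pos + 1 - ps.2) else 0)
      (max 0 (pos + 1 - ps.2) + 1) 1).map (fun x => (ps.1 ++ [x], ps.2 + x)))

def expr_trees_alt (n : Int) (u : Int) (i : Int) : List (List Int) :=
  ((PySem.List.pyRange i n 1).foldl (fun fr pos => exprStep n pos fr) [([], u)]).map Prod.fst

-- ===== PRECONDITION & SPEC =====
-- Pre_ excludes i > n, where Python A recurses past n forever and raises RecursionError, and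
-- recursion depth n - i ≥ 997, where A under CPython's default recursion limit (1000) raises
-- RecursionError as well (996 is the deepest call chain Source A completes under the default limit).
def Pre_expr_trees (n : Int) (u : Int) (i : Int) : Prop := i ≤ n ∧ n - i ≤ 996
instance (n : Int) (u : Int) (i : Int) : Decidable (Pre_expr_trees n u i) := by
  unfold Pre_expr_trees; infer_instance

def pvWitness_expr_trees : Int × Int × Int := (4, 0, 0)

def Spec_expr_trees (n : Int) (u : Int) (i : Int) (out : List (List Int)) : Prop := out = expr_trees_alt n u i
instance (n : Int) (u : Int) (i : Int) (out : List (List Int)) : Decidable (Spec_expr_trees n u i out) := by unfold Spec_expr_trees; infer_instance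

-- ===== CLAIM (what is proved, stated in full; the proofs are below) =====
def Claim_equal_expr_trees : Prop := ∀ (n : Int) (u : Int) (i : Int), Dom_expr_trees n u i → Pre_expr_trees n u i → Spec_expr_trees n u i (expr_trees n u i)

-- ===== LEMMAS AND PROOFS =====

lemma foldl_append_map_eq_flatMap {α β : Type} (f : α → List β) :
    ∀ (l : List α) (init : List β),
      l.foldl (fun acc e => acc ++ f e) init = init ++ l.flatMap f := by
  intro l
  induction l with
  | nil => intro init; simp
  | cons a t ih => intro init; simp [List.foldl, ih, List.append_assoc]

-- main invariant: folding the remaining positions expands each frontier state by A's result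
lemma key (n : Int) : ∀ (k : Nat) (pos : Int), pos ≤ n → (n - pos).toNat = k →
    ∀ (F : List (List Int × Int)),
      (PySem.List.pyRange pos n 1).foldl (fun fr p => exprStep n p fr) F
        = F.flatMap (fun ps =>
            (exprTreesFuel k n ps.2 pos).map (fun y => (ps.1 ++ y, ps.2 + y.sum))) := by
  intro k
  induction k with
  | zero =>
    intro pos hle hk F
    have hpn : pos = n := by omega
    subst hpn
    rw [PySem.List.pyRange_one_eq_nil le_rfl]
    simp [exprTreesFuel]
  | succ f ih =>
    intro pos hle hk F
    have hlt : pos < n := by omega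
    rw [PySem.List.pyRange_one_cons hlt]
    simp only [List.foldl_cons]
    rw [ih (pos + 1) (by omega) (by omega) (exprStep n pos F)]
    rw [show exprStep n pos F = F.flatMap (fun ps =>
      (PySem.List.pyRange (if pos + 1 = n then max 0 (pos + 1 - ps.2) else 0)
        (max 0 (pos + 1 - ps.2) + 1) 1).map (fun x => (ps.1 ++ [x], ps.2 + x))) from rfl]
    rw [List.flatMap_assoc]
    have hne : pos ≠ n := by omega
    congr 1
    funext ps
    conv_rhs => rw [show exprTreesFuel (f+1) n ps.2 pos
        = (PySem.List.pyRange (if pos + 1 = n then max 0 (pos + 1 - ps.2) else 0)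
            (max 0 (pos + 1 - ps.2) + 1) 1).foldl
            (fun acc x => acc ++ (exprTreesFuel f n (ps.2 + x) (pos + 1)).map (fun y => x :: y)) []
      from by simp [exprTreesFuel, hne]]
    rw [foldl_append_map_eq_flatMap]
    simp only [List.nil_append, List.map_flatMap, List.flatMap_map]
    congr 1
    funext x
    simp [List.map_map, Function.comp_def, List.append_assoc, add_assoc]

-- ===== VERDICT (by name: the statement is the Claim_ definition above) =====
theorem expr_trees_spec : Claim_equal_expr_trees := by
  intro n u i _ hpre
  unfold Spec_expr_trees expr_trees expr_trees_alt
  rw [key n (n - i).toNat i hpre.1 rfl]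
  simp [Function.comp_def]
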